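-- pv_equiv track=rewrite | github.com/AbrerAsif07/LeetcodeSolutions | 1.Basic math questions/count_digits.py | countdig
-- ===== SOURCE A (Python) =====
-- def countdig(n):
--     x = n
--     count = 0
--     while x > 0:
--         ld = x % 10
--         x = x // 10
--         if ld != 0:
--             if n % ld == 0:
--                 count += 1
--     return count
-- ===== SOURCE B (Python) =====
-- def countdig(n):
--     if n <= 0:
--         return 0
--     return sum(1 for ch in str(n) if ch != '0' and n % int(ch) == 0)
-- ===== Notes on version B (the rewrite author's own statement) =====
-- stated objective: simpler
-- what changed: Replaces the %10-//10 arithmetic digit loop with a single most-significant-first pass over the characters of str(n), counting nonzero digit characters that divide n via a generator sum.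
import Mathlib
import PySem

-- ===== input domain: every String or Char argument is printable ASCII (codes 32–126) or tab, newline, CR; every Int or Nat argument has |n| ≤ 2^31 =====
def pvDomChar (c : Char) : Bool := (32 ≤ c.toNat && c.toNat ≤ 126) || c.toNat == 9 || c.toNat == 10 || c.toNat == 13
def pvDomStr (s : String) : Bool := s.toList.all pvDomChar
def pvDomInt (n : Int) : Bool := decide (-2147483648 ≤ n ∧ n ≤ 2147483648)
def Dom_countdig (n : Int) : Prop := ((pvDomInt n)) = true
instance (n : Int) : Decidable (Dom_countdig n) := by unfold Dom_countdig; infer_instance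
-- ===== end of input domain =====

-- B replaces A's least-significant-first %10//10 arithmetic digit loop by a single pass over the
-- characters of str(n) (guarded by n <= 0 -> 0); same count, simpler to read, not claimed faster.


-- ===== PORT A =====
-- the while loop of A: state (x, count), one %10 // 10 step per iteration
def countdigLoop (n x count : Int) : Int :=
  if h : 0 < x then
    let ld := PySem.Int.mod x 10
    let x' := PySem.Int.floordiv x 10
    countdigLoop n x'
      (if ld ≠ 0 then (if PySem.Int.mod n ld = 0 then count + 1 else count) else count)
  else count
termination_by x.toNat
decreasing_by
  have h10 : PySem.Int.floordiv x 10 = x / 10 := PySem.Int.floordiv_eq_ediv_of_pos (by omega)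
  simp only [h10]
  omega

def countdig (n : Int) : Int := countdigLoop n n 0

-- ===== PORT B =====
-- one term of B's generator: 1 if ch is a nonzero digit character dividing n, else 0.
-- int(ch) is ported as ch.toNat - 48, exact for the decimal digit characters of str(n)
def countdigWeight (n : Int) (ch : Char) : Int :=
  if ch ≠ '0' ∧ PySem.Int.mod n ((ch.toNat : Int) - 48) = 0 then 1 else 0

def countdig_alt (n : Int) : Int :=
  if n ≤ 0 then 0
  else ((PySem.Int.toChars n).map (countdigWeight n)).sum

-- ===== PRECONDITION & SPEC =====
def Spec_countdig (n : Int) (out : Int) : Prop := out = countdig_alt n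
instance (n : Int) (out : Int) : Decidable (Spec_countdig n out) := by unfold Spec_countdig; infer_instance

-- ===== CLAIM (what is proved, stated in full; the proofs are below) =====
def Claim_equal_countdig : Prop := ∀ (n : Int), Dom_countdig n → Spec_countdig n (countdig n)

-- ===== LEMMAS AND PROOFS =====

-- the weight of the character of a single decimal digit d
lemma countdigWeight_digitChar (n : Int) (d : Nat) (hd : d < 10) :
    countdigWeight n (Nat.digitChar d)
      = if (d : Int) ≠ 0 ∧ PySem.Int.mod n (d : Int) = 0 then 1 else 0 := by
  interval_cases d <;> simp [countdigWeight, Nat.digitChar]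

-- the loop exits immediately on a nonpositive x
lemma countdigLoop_nonpos (n x count : Int) (hx : x ≤ 0) : countdigLoop n x count = count := by
  rw [countdigLoop]
  simp [show ¬ 0 < x by omega]

-- A's nested if on (ld, n % ld) adds exactly the 0/1 weight B sums
lemma countdig_step (c1 c2 : Prop) [Decidable c1] [Decidable c2] (count : Int) :
    (if c1 then (if c2 then count + 1 else count) else count)
      = count + (if c1 ∧ c2 then 1 else 0) := by
  by_cases h1 : c1 <;> by_cases h2 : c2 <;> simp [h1, h2]

-- the loop of A, run on a nonnegative m, counts exactly what B's pass counts on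
-- Nat.toDigitsCore's output (acc carries the already-emitted low characters)
lemma countdigLoop_toDigitsCore (n : Int) :
    ∀ (f m : Nat) (acc : List Char) (count : Int), m < f →
      countdigLoop n (m : Int) count + (acc.map (countdigWeight n)).sum
        = count + ((Nat.toDigitsCore 10 f m acc).map (countdigWeight n)).sum := by
  intro f
  induction f with
  | zero => intro m acc count h; omega
  | succ f ih =>
    intro m acc count hmf
    have hmod : PySem.Int.mod (m : Int) 10 = ((m % 10 : Nat) : Int) := by
      rw [PySem.Int.mod_eq_emod_of_pos (by omega)]; omega
    have hdiv : PySem.Int.floordiv (m : Int) 10 = ((m / 10 : Nat) : Int) := by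
      rw [PySem.Int.floordiv_eq_ediv_of_pos (by omega)]; omega
    have hdig := countdigWeight_digitChar n (m % 10) (by omega)
    rw [Nat.toDigitsCore]
    by_cases hm : m = 0
    · subst hm
      simp only [Nat.zero_div, if_true, Nat.zero_mod, Nat.cast_zero]
      rw [countdigLoop_nonpos n 0 count (by omega), List.map_cons, List.sum_cons]
      simpa using hdig
    · have hpos : 0 < (m : Int) := by exact_mod_cast Nat.pos_of_ne_zero hm
      rw [countdigLoop, dif_pos hpos]
      simp only [hmod, hdiv, countdig_step]
      by_cases h0 : m / 10 = 0
      · -- last digit: the loop's next iteration exits, toDigitsCore emits the final char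
        simp only [h0, if_true, Nat.cast_zero]
        rw [countdigLoop_nonpos n 0 _ (by omega), List.map_cons, List.sum_cons, hdig]
        ring
      · -- one loop iteration = one toDigitsCore step, then the induction hypothesis
        simp only [h0, if_false]
        have hrec : m / 10 < f := by
          have : m / 10 < m := Nat.div_lt_self (Nat.pos_of_ne_zero hm) (by omega)
          omega
        have hih := ih (m / 10) (Nat.digitChar (m % 10) :: acc)
          (count + (if ((m % 10 : Nat) : Int) ≠ 0 ∧ PySem.Int.mod n ((m % 10 : Nat) : Int) = 0
            then 1 else 0)) hrec
        rw [List.map_cons, List.sum_cons, hdig] at hih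
        omega

lemma countdigLoop_eq_sum (n : Int) (m : Nat) :
    countdigLoop n (m : Int) 0 = ((Nat.toDigits 10 m).map (countdigWeight n)).sum := by
  have := countdigLoop_toDigitsCore n (m + 1) m [] 0 (by omega)
  simpa [Nat.toDigits] using this

-- ===== VERDICT (by name: the statement is the Claim_ definition above) =====
theorem countdig_spec : Claim_equal_countdig := by
  intro n _
  unfold Spec_countdig countdig countdig_alt
  by_cases hn : n ≤ 0
  · simp [hn, countdigLoop_nonpos n n 0 hn]
  · push Not at hn
    simp only [show ¬ n ≤ 0 by omega, if_false]
    have htc : PySem.Int.toChars n = Nat.toDigits 10 n.toNat := by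
      simp [PySem.Int.toChars, show ¬ n < 0 by omega]
    have hcast : ((n.toNat : Int)) = n := Int.toNat_of_nonneg (le_of_lt hn)
    rw [htc, ← countdigLoop_eq_sum n n.toNat, hcast]
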